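-- pv_equiv track=rewrite | github.com/Tanganelli/aioCoAPthon | utilities/utils.py | byte_len
-- ===== SOURCE A (Python) =====
-- def byte_len(number: int) -> int:
--     """
--     Get the number of byte needed to encode the int passed.
--
--     :param number: the int to be converted
--     :return: the number of bits needed to encode the int passed.
--     """
--     length = 0
--     while number:
--         number >>= 1
--         length += 1
--     if length > 0:
--         if length % 8 != 0:
--             length = int(length / 8) + 1
--         else:
--             length = int(length / 8)
--     return length
-- ===== SOURCE B (Python) =====
-- def byte_len(number: int) -> int:
--     """
--     Get the number of bytes needed to encode the int passed.
--
--     Closed form: ceil(bit_length / 8), no loop at all.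
--     """
--     return (number.bit_length() + 7) // 8
-- ===== Notes on version B (the rewrite author's own statement) =====
-- stated objective: simpler
-- what changed: Replaces A's bit-counting loop plus modulo/ceiling conversion with the loop-free closed form (bit_length()+7)//8.
import Mathlib
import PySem

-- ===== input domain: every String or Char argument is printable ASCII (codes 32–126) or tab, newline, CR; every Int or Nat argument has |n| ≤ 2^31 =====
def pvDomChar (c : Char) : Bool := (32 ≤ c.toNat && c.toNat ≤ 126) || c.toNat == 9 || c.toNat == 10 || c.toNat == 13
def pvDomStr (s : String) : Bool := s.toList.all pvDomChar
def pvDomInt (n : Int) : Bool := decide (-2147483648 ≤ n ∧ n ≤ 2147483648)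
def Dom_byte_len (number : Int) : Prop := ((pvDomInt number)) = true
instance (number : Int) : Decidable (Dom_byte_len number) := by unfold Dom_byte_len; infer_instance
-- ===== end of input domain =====

-- B replaces A's bit-counting loop and modulo/ceiling conversion with the closed form (bit_length()+7)//8 (objective: simpler).


-- ===== PORT A =====
-- A's bit-counting loop: `while number: number >>= 1; length += 1`.
-- For number > 0, Python's `number >> 1` is floor division by 2 = Int ediv by 2.
-- For number < 0 the Python loop never terminates (number stays at -1); the
-- guard `number ≤ 0` only makes the Lean function total there (outside Pre_).
def byteLenLoopA (number length : Int) : Int :=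
  if number ≤ 0 then length
  else byteLenLoopA (number / 2) (length + 1)
termination_by number.toNat
decreasing_by omega

def byte_len (number : Int) : Int :=
  let length := byteLenLoopA number 0
  if length > 0 then
    if length % 8 ≠ 0 then length / 8 + 1   -- int(length/8)+1 : length ≥ 0, so truncation = ediv
    else length / 8
  else length

-- ===== PORT B =====
-- B's closed form: (number.bit_length() + 7) // 8.
-- Python's int.bit_length() is the bit length of |number|, i.e. Nat.size number.natAbs;
-- '//' is Python floor division = PySem.Int.floordiv.
def byte_len_alt (number : Int) : Int :=
  PySem.Int.floordiv ((number.natAbs.size : Int) + 7) 8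

-- ===== PRECONDITION & SPEC =====
-- Pre_ excludes negative numbers: there A's Python loop never terminates (no value is returned).
def Pre_byte_len (number : Int) : Prop := 0 ≤ number
instance (number : Int) : Decidable (Pre_byte_len number) := by unfold Pre_byte_len; infer_instance
def pvWitness_byte_len : Int := 300

def Spec_byte_len (number : Int) (out : Int) : Prop := out = byte_len_alt number
instance (number : Int) (out : Int) : Decidable (Spec_byte_len number out) := by unfold Spec_byte_len; infer_instance

-- ===== CLAIM (what is proved, stated in full; the proofs are below) =====
def Claim_equal_byte_len : Prop := ∀ (number : Int), Dom_byte_len number → Pre_byte_len number → Spec_byte_len number (byte_len number)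

-- ===== LEMMAS AND PROOFS =====

-- The accumulator is additive.
theorem byteLenLoopA_acc : ∀ (m : Nat) (n acc : Int), n.toNat = m →
    byteLenLoopA n acc = byteLenLoopA n 0 + acc := by
  intro m
  induction m using Nat.strong_induction_on with
  | _ m ih =>
    intro n acc hm
    by_cases h : n ≤ 0
    · simp [byteLenLoopA, h]
    · have hlt : (n / 2).toNat < m := by omega
      conv_lhs => rw [byteLenLoopA]
      conv_rhs => rw [byteLenLoopA]
      simp only [h, if_false, zero_add]
      rw [ih _ hlt (n / 2) (acc + 1) rfl, ih _ hlt (n / 2) 1 rfl]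
      ring

-- A's loop computes the bit length (Nat.size) of a nonnegative number.
theorem byteLenLoopA_size : ∀ (m : Nat) (n : Int), 0 ≤ n → n.toNat = m →
    byteLenLoopA n 0 = (n.toNat.size : Int) := by
  intro m
  induction m using Nat.strong_induction_on with
  | _ m ih =>
    intro n hn hm
    by_cases h : n ≤ 0
    · have : n = 0 := le_antisymm h hn
      subst this
      rw [byteLenLoopA]
      simp
    · rw [byteLenLoopA]
      simp only [h, if_false, zero_add]
      rw [byteLenLoopA_acc (n / 2).toNat (n / 2) 1 rfl]
      rw [ih (n / 2).toNat (by omega) (n / 2) (by omega) rfl]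
      have hdiv : (n / 2).toNat = n.toNat / 2 := by omega
      rw [hdiv]
      -- Nat.size n = Nat.size (n/2) + 1 for n ≠ 0
      have hne : n.toNat ≠ 0 := by omega
      have hsz : n.toNat.size = (n.toNat / 2).size + 1 := by
        conv_lhs => rw [← Nat.bit_decide_mod_two_eq_one_shiftRight_one n.toNat]
        rw [Nat.size_bit]
        · simp [Nat.shiftRight_succ, Nat.shiftRight_zero]
        · rw [Nat.bit_decide_mod_two_eq_one_shiftRight_one]; exact hne
      omega

-- ===== VERDICT (by name: the statement is the Claim_ definition above) =====
theorem byte_len_spec : Claim_equal_byte_len := by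
  intro n _ hpre
  unfold Pre_byte_len at hpre
  unfold Spec_byte_len byte_len_alt byte_len
  have hsz := byteLenLoopA_size n.toNat n hpre rfl
  have habs : n.natAbs = n.toNat := by omega
  rw [habs]
  have hnn : (0 : Int) ≤ (n.toNat.size : Int) := by positivity
  rw [hsz]
  simp only [PySem.Int.floordiv]
  rw [Int.fdiv_eq_ediv_of_nonneg _ (by omega)]
  set L : Int := (n.toNat.size : Int) with hL
  split_ifs <;> omega
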